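-- pv_equiv track=rewrite | github.com/manersun/nsga2 | function.py | get_new_pop
-- ===== SOURCE A (Python) =====
-- def get_new_pop(geti_res,getiVal_res,popSize):
--     initsize=0;res=[];new_realT_realC_realQ=[]
--     for i in range(len(geti_res)):
--         count = initsize + len(geti_res[i])
--         if((count)<popSize):
--             initsize += len(geti_res[i])
--             res.extend(geti_res[i])
--             new_realT_realC_realQ.extend(getiVal_res[i])
--         else:
--             k = popSize - initsize
--             res.extend(geti_res[i][0:k])
--             new_realT_realC_realQ.extend(getiVal_res[i][0:k])
--             break
--     return res,new_realT_realC_realQ;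
-- ===== SOURCE B (Python) =====
-- def get_new_pop(geti_res, getiVal_res, popSize):
--     # precompute front lengths, find the cutoff front, then build by slicing
--     lens = [len(g) for g in geti_res]
--     total = 0
--     cut = None
--     for i, L in enumerate(lens):
--         if total + L >= popSize:
--             cut = i
--             break
--         total += L
--     if cut is None:
--         res = [x for g in geti_res for x in g]
--         vals = [x for g in getiVal_res[:len(geti_res)] for x in g]
--         return res, vals
--     k = popSize - total
--     res = [x for g in geti_res[:cut] for x in g] + geti_res[cut][0:k]
--     vals = [x for g in getiVal_res[:cut] for x in g] + getiVal_res[cut][0:k]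
--     return res, vals
-- ===== Notes on version B (the rewrite author's own statement) =====
-- stated objective: alternative
-- what changed: A accumulates the output lists while scanning fronts and breaks mid-loop; B first computes the front lengths and finds the cutoff front with its preceding cumulative size, then builds both outputs by slicing/concatenating the prefix of fronts plus a k-slice of the cutoff front.
import Mathlib
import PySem

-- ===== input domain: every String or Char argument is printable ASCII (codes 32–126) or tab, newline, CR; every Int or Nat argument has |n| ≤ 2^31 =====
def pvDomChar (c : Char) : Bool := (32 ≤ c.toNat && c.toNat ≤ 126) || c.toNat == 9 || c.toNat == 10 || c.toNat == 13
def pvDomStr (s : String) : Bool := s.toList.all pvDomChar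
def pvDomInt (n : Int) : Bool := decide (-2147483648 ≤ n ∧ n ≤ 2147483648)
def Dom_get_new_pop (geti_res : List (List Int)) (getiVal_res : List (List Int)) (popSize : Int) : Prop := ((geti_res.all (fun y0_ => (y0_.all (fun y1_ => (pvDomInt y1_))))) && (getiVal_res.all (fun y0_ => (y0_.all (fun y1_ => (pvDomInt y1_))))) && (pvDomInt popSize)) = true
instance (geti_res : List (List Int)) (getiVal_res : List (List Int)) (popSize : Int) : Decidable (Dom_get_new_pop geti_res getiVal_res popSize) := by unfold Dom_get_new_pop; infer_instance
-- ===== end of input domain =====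

-- B precomputes front lengths and a cutoff index, then builds both outputs by slicing,
-- instead of A's accumulate-and-break scan (alternative decomposition, same cost).


-- ===== PORT A =====
-- A's for-loop over i in range(len(geti_res)) with break; getiVal_res[i] is ported with
-- pyGet? (getD [] stands where Python raises IndexError — those inputs are outside Pre_).
def pvA_loop (geti_res : List (List Int)) (getiVal_res : List (List Int)) (popSize : Int)
    (i : Nat) (initsize : Int) (res : List Int) (vals : List Int) : List Int × List Int :=
  if h : i < geti_res.length then
    let gi := geti_res[i]
    let count := initsize + (gi.length : Int)
    if count < popSize then
      pvA_loop geti_res getiVal_res popSize (i + 1) (initsize + (gi.length : Int))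
        (res ++ gi) (vals ++ ((PySem.List.pyGet? getiVal_res (i : Int)).getD []))
    else
      let k := popSize - initsize
      (res ++ PySem.List.slice gi (some 0) (some k),
       vals ++ PySem.List.slice ((PySem.List.pyGet? getiVal_res (i : Int)).getD []) (some 0) (some k))
  else (res, vals)
termination_by geti_res.length - i

def get_new_pop (geti_res : List (List Int)) (getiVal_res : List (List Int)) (popSize : Int) : List Int × List Int :=
  pvA_loop geti_res getiVal_res popSize 0 0 [] []

-- ===== PORT B =====
-- Source B's cutoff search: first front index where total + len >= popSize, with the cumulative
-- size before it; None if no front reaches popSize.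
def pvB_findCut (lens : List Int) (popSize : Int) (total : Int) : Option (Nat × Int) :=
  match lens with
  | [] => none
  | L :: rest =>
    if popSize ≤ total + L then some (0, total)
    else
      match pvB_findCut rest popSize (total + L) with
      | some (c, t) => some (c + 1, t)
      | none => none

def get_new_pop_alt (geti_res : List (List Int)) (getiVal_res : List (List Int)) (popSize : Int) : List Int × List Int :=
  let lens := geti_res.map (fun g => (g.length : Int))
  match pvB_findCut lens popSize 0 with
  | none =>
      (geti_res.flatMap id,
       (PySem.List.slice getiVal_res none (some (geti_res.length : Int))).flatMap id)
  | some (cut, total) =>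
      let k := popSize - total
      ((PySem.List.slice geti_res none (some (cut : Int))).flatMap id
         ++ PySem.List.slice ((PySem.List.pyGet? geti_res (cut : Int)).getD []) (some 0) (some k),
       (PySem.List.slice getiVal_res none (some (cut : Int))).flatMap id
         ++ PySem.List.slice ((PySem.List.pyGet? getiVal_res (cut : Int)).getD []) (some 0) (some k))

-- ===== PRECONDITION & SPEC =====
-- cumulative number of individuals in the first i fronts
def pvPrefix (geti_res : List (List Int)) (i : Nat) : Int :=
  ((geti_res.take i).map (fun g => (g.length : Int))).sum

-- Pre_ holds exactly where Python A returns: every front index the loop actually visits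
-- (index 0, and any i whose preceding fronts do not yet fill popSize) must be a valid
-- index into getiVal_res; otherwise A raises IndexError.
def Pre_get_new_pop (geti_res : List (List Int)) (getiVal_res : List (List Int)) (popSize : Int) : Prop :=
  ∀ i : Nat, i < geti_res.length → (i = 0 ∨ pvPrefix geti_res i < popSize) → i < getiVal_res.length

instance (geti_res : List (List Int)) (getiVal_res : List (List Int)) (popSize : Int) : Decidable (Pre_get_new_pop geti_res getiVal_res popSize) := by unfold Pre_get_new_pop; infer_instance

def pvWitness_get_new_pop : List (List Int) × List (List Int) × Int :=
  ([[1, 2], [3], [4, 5]], [[10, 20], [30], [40, 50]], 3)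

def Spec_get_new_pop (geti_res : List (List Int)) (getiVal_res : List (List Int)) (popSize : Int) (out : List Int × List Int) : Prop := out = get_new_pop_alt geti_res getiVal_res popSize
instance (geti_res : List (List Int)) (getiVal_res : List (List Int)) (popSize : Int) (out : List Int × List Int) : Decidable (Spec_get_new_pop geti_res getiVal_res popSize out) := by unfold Spec_get_new_pop; infer_instance

-- ===== CLAIM (what is proved, stated in full; the proofs are below) =====
def Claim_equal_get_new_pop : Prop := ∀ (geti_res : List (List Int)) (getiVal_res : List (List Int)) (popSize : Int), Dom_get_new_pop geti_res getiVal_res popSize → Pre_get_new_pop geti_res getiVal_res popSize → Spec_get_new_pop geti_res getiVal_res popSize (get_new_pop geti_res getiVal_res popSize)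


-- ===== LEMMAS AND PROOFS =====

-- Common reference shape: structural recursion over the fronts with the remaining budget.
def pvRef : List (List Int) → List (List Int) → Int → List Int × List Int
  | [], _, _ => ([], [])
  | g :: gs, vs, p =>
    if (g.length : Int) < p then
      let r := pvRef gs vs.tail (p - (g.length : Int))
      (g ++ r.1, vs.headD [] ++ r.2)
    else
      (PySem.List.slice g (some 0) (some p),
       PySem.List.slice (vs.headD []) (some 0) (some p))

lemma pvA_loop_eq_ref (g v : List (List Int)) (p : Int) :
    ∀ (n i : Nat), g.length - i ≤ n → ∀ (s : Int) (r w : List Int),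
      pvA_loop g v p i s r w =
        (r ++ (pvRef (g.drop i) (v.drop i) (p - s)).1,
         w ++ (pvRef (g.drop i) (v.drop i) (p - s)).2) := by
  intro n
  induction n with
  | zero =>
    intro i hi s r w
    rw [pvA_loop]
    have hge : ¬ i < g.length := by omega
    simp [hge, List.drop_eq_nil_of_le (by omega : g.length ≤ i), pvRef]
  | succ n ih =>
    intro i hi s r w
    rw [pvA_loop]
    by_cases hlt : i < g.length
    · have hgd : g.drop i = g[i] :: g.drop (i + 1) := List.drop_eq_getElem_cons hlt
      have hvh : (v.drop i).headD [] = (PySem.List.pyGet? v (i : Int)).getD [] := by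
        simp [List.head?_drop]
      have hvt : (v.drop i).tail = v.drop (i + 1) := List.tail_drop
      rw [hgd]
      simp only [pvRef, hvh, hvt]
      by_cases hc : s + (g[i].length : Int) < p
      · have hc' : (g[i].length : Int) < p - s := by omega
        simp only [hlt, dif_pos, hc, if_pos, hc']
        rw [ih (i + 1) (by omega)]
        have : p - (s + (g[i].length : Int)) = p - s - (g[i].length : Int) := by ring
        simp [this, List.append_assoc]
      · have hc' : ¬ (g[i].length : Int) < p - s := by omega
        simp [hlt, hc, hc']
    · have hge : g.length ≤ i := by omega
      simp [hlt, List.drop_eq_nil_of_le hge, pvRef]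

lemma pvB_findCut_shift (lens : List Int) (p : Int) :
    ∀ t : Int, pvB_findCut lens p t =
      (pvB_findCut lens (p - t) 0).map (fun ct => (ct.1, ct.2 + t)) := by
  induction lens generalizing p with
  | nil => intro t; simp [pvB_findCut]
  | cons L rest ih =>
    intro t
    rw [pvB_findCut, pvB_findCut]
    by_cases hc : p ≤ t + L
    · have hc' : p - t ≤ 0 + L := by omega
      rw [if_pos hc, if_pos hc']
      simp
    · have hc' : ¬ p - t ≤ 0 + L := by omega
      have harg : p - (t + L) = p - t - (0 + L) := by ring
      rw [if_neg hc, if_neg hc', ih p (t + L), ih (p - t) (0 + L), harg]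
      cases pvB_findCut rest (p - t - (0 + L)) 0 with
      | none => simp
      | some ct =>
        obtain ⟨c, t0⟩ := ct
        simp
        ring

lemma pvslice_zero {α : Type} (xs : List α) : PySem.List.slice xs none (some (0 : Int)) = [] := by
  rw [PySem.List.slice_to xs le_rfl]
  simp

lemma pvslice_cast_succ {α : Type} (xs : List α) (n : Nat) :
    PySem.List.slice xs none (some ((n : Int) + 1)) = xs.take (n + 1) := by
  have h : ((n : Int) + 1) = ((n + 1 : Nat) : Int) := by push_cast; ring
  rw [h, PySem.List.slice_to_natCast]

lemma pvB_eq_ref : ∀ (g : List (List Int)) (v : List (List Int)) (p : Int),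
    get_new_pop_alt g v p = pvRef g v p := by
  intro g
  induction g with
  | nil =>
    intro v p
    simp [get_new_pop_alt, pvB_findCut, pvRef, PySem.List.slice]
  | cons g gs ih =>
    intro v p
    simp only [get_new_pop_alt, List.map_cons]
    rw [pvB_findCut]
    simp only [zero_add]
    by_cases hc : p ≤ (g.length : Int)
    · rw [if_pos hc]
      simp only [pvRef]
      rw [if_neg (by omega)]
      have h0 : PySem.List.pyGet? ([] : List (List Int)) 0 = none := rfl
      cases v <;>
        simp [h0, pvslice_zero]
    · rw [if_neg hc]
      have hlt : (g.length : Int) < p := by omega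
      rw [pvB_findCut_shift (gs.map (fun x => (x.length : Int))) p (g.length : Int)]
      simp only [pvRef]
      rw [if_pos hlt, ← ih v.tail (p - (g.length : Int))]
      simp only [get_new_pop_alt]
      cases hf : pvB_findCut (gs.map (fun x => (x.length : Int))) (p - (g.length : Int)) 0 with
      | none =>
        simp only [Option.map_none]
        cases v <;>
          simp [PySem.List.slice_to_natCast, pvslice_cast_succ]
      | some ct =>
        obtain ⟨c, t0⟩ := ct
        simp only [Option.map_some]
        have hk : p - (t0 + (g.length : Int)) = p - (g.length : Int) - t0 := by ring
        have hcast : ((c + 1 : Nat) : Int) = ((c : Nat) : Int) + 1 := by push_cast; ring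
        have h1 : PySem.List.pyGet? ([] : List (List Int)) ((c : Int) + 1) = none := by
          rw [← hcast, PySem.List.pyGet?_natCast]; simp
        cases v with
        | nil =>
          simp [PySem.List.pyGet?_cons_succ, PySem.List.pyGet?_natCast, h1, hk,
            pvslice_cast_succ, List.take_succ_cons]
        | cons v0 vt =>
          simp [PySem.List.pyGet?_cons_succ, PySem.List.pyGet?_natCast, hk,
            pvslice_cast_succ, List.take_succ_cons]

-- ===== VERDICT (by name: the statement is the Claim_ definition above) =====
theorem get_new_pop_spec : Claim_equal_get_new_pop := by
  intro g v p _ _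
  unfold Spec_get_new_pop get_new_pop
  rw [pvB_eq_ref, pvA_loop_eq_ref g v p g.length 0 (by omega) 0 [] []]
  simp
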